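-- pv_equiv track=rewrite | github.com/hydrusnetwork/hydrus | hydrus/core/HydrusTags.py | FilterNamespaces
-- ===== SOURCE A (Python) =====
-- import collections
-- import collections.abc
--
-- def FilterNamespaces( tags, namespaces ):
--
--     processed_tags = collections.defaultdict( set )
--
--     for tag in tags:
--
--         ( namespace, subtag ) = SplitTag( tag )
--
--         processed_tags[ namespace ].add( tag )
--
--
--     result = set()
--
--     for namespace in namespaces:
--
--         if namespace is None:
--
--             result.update( processed_tags[ '' ] )
--
--         else:
--
--             result.update( processed_tags[ namespace ] )
--
--
--
--     return result
--
-- def SplitTag( tag ):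
--
--     if ':' in tag:
--
--         return tuple( tag.split( ':', 1 ) )
--
--     else:
--
--         return ( '', tag )
-- ===== SOURCE B (Python) =====
-- def FilterNamespaces( tags, namespaces ):
--
--     result = set()
--
--     for namespace in namespaces:
--
--         wanted = '' if namespace is None else namespace
--
--         for tag in tags:
--
--             if ( tag.split( ':', 1 )[0] if ':' in tag else '' ) == wanted:
--
--                 result.add( tag )
--
--
--
--
--     return result
-- ===== Notes on version B (the rewrite author's own statement) =====
-- stated objective: simpler
-- what changed: Replaces A's group-all-tags-into-a-defaultdict-of-sets-then-union-the-requested-buckets with a direct nested scan: for each requested namespace (None normalised to ''), add the tags whose namespace matches into one result set, no dict and no SplitTag helper.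
import Mathlib
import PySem

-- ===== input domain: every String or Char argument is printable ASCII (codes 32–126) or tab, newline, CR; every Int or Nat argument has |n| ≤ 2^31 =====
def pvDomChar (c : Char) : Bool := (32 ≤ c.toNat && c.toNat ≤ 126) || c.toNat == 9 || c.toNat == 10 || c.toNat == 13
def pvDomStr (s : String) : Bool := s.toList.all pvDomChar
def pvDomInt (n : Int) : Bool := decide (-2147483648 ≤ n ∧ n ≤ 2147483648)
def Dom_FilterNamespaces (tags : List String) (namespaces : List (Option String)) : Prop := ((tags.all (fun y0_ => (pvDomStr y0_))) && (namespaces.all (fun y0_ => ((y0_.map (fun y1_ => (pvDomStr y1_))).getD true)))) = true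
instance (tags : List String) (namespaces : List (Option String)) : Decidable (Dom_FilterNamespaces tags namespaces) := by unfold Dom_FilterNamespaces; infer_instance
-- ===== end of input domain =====

-- B replaces A's build-a-dict-of-namespace-buckets-then-union pass with a plainer nested scan
-- (for each requested namespace, add the matching tags to one result set); objective: simpler.
-- Equivalence is about the returned set; its Python iteration order is not modelled.

-- ===== PORT A =====
-- SplitTag helper of A ('tag.split(":", 1)' always yields two pieces when ':' is in tag;
-- the '_' fallback branches are unreachable).
def SplitTag (tag : String) : String × String :=
  if PySem.Str.isIn ":" tag then
    match PySem.Str.splitMax? tag ":" 1 with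
    | some (a :: rest) => (a, rest.headD "")
    | _ => ("", tag)
  else ("", tag)

def FilterNamespaces (tags : List String) (namespaces : List (Option String)) : List String :=
  let processed_tags : PySem.Dict String (PySem.Set String) :=
    tags.foldl (fun d tag =>
      let ns := (SplitTag tag).1
      d.modify ns PySem.Set.empty (fun s => PySem.Set.add s tag)) PySem.Dict.empty
  namespaces.foldl (fun result ns_ =>
    match ns_ with
    | none => PySem.Set.update result (processed_tags.getD "" PySem.Set.empty)
    | some ns => PySem.Set.update result (processed_tags.getD ns PySem.Set.empty)) PySem.Set.empty

-- ===== PORT B =====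
-- "tag.split(':', 1)[0] if ':' in tag else ''"
def pvNsOf (tag : String) : String :=
  if PySem.Str.isIn ":" tag then
    match PySem.Str.splitMax? tag ":" 1 with
    | some (a :: _) => a
    | _ => ""
  else ""

def FilterNamespaces_alt (tags : List String) (namespaces : List (Option String)) : List String :=
  namespaces.foldl (fun result ns_ =>
    let wanted := ns_.getD ""
    tags.foldl (fun r tag =>
      if pvNsOf tag == wanted then PySem.Set.add r tag else r) result) PySem.Set.empty

-- ===== PRECONDITION & SPEC =====
def Spec_FilterNamespaces (tags : List String) (namespaces : List (Option String)) (out : List String) : Prop := out = FilterNamespaces_alt tags namespaces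
instance (tags : List String) (namespaces : List (Option String)) (out : List String) : Decidable (Spec_FilterNamespaces tags namespaces out) := by unfold Spec_FilterNamespaces; infer_instance

-- ===== CLAIM (what is proved, stated in full; the proofs are below) =====
def Claim_equal_FilterNamespaces : Prop := ∀ (tags : List String) (namespaces : List (Option String)), Dom_FilterNamespaces tags namespaces → Spec_FilterNamespaces tags namespaces (FilterNamespaces tags namespaces)

-- ===== LEMMAS AND PROOFS =====

-- B's inline namespace extraction computes the first component of A's SplitTag.
theorem pvNsOf_eq_SplitTag_fst (tag : String) : pvNsOf tag = (SplitTag tag).1 := by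
  unfold pvNsOf SplitTag
  split
  · rcases h : PySem.Str.splitMax? tag ":" 1 with _ | ⟨_ | ⟨a, rest⟩⟩ <;> simp
  · rfl

-- The dict bucket A builds for a namespace ns is exactly the conditional-add fold over tags.
theorem pv_bucket (tags : List String) (ns : String)
    (d : PySem.Dict String (PySem.Set String)) :
    (tags.foldl (fun d tag =>
        d.modify (SplitTag tag).1 PySem.Set.empty (fun s => PySem.Set.add s tag)) d).getD ns PySem.Set.empty
      = tags.foldl (fun s tag =>
          if pvNsOf tag == ns then PySem.Set.add s tag else s) (d.getD ns PySem.Set.empty) := by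
  induction tags generalizing d with
  | nil => rfl
  | cons t ts ih =>
    simp only [List.foldl_cons, ih, PySem.Dict.getD_modify, pvNsOf_eq_SplitTag_fst]
    by_cases h : ns = (SplitTag t).1
    · simp [h]
    · simp [h, Ne.symm h, beq_iff_eq]

-- Folding a set's elements into the result set commutes with a single add.
theorem pv_update_add (r b : PySem.Set String) (t : String) :
    PySem.Set.update r (PySem.Set.add b t) = PySem.Set.add (PySem.Set.update r b) t := by
  by_cases hm : t ∈ b
  · have h2 : t ∈ PySem.Set.update r b := (PySem.Set.mem_update r b t).2 (Or.inr hm)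
    simp [PySem.Set.add, hm, h2]
  · have h1 : PySem.Set.add b t = b ++ [t] := by simp [PySem.Set.add, hm]
    rw [h1]
    simp [PySem.Set.update, List.foldl_append]

-- Adding to the result set all elements of a bucket built by conditional adds is the same as
-- performing those conditional adds on the result set directly.
theorem pv_update_bucket (tags : List String) (p : String → Bool)
    (b r : PySem.Set String) :
    PySem.Set.update r (tags.foldl (fun s tag => if p tag then PySem.Set.add s tag else s) b)
      = tags.foldl (fun s tag => if p tag then PySem.Set.add s tag else s) (PySem.Set.update r b) := by
  induction tags generalizing b r with
  | nil => rfl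
  | cons t ts ih =>
    simp only [List.foldl_cons, ih]
    congr 1
    by_cases h : p t
    · simp [h, pv_update_add]
    · simp [h]

-- Main induction over the requested namespaces: A's union-the-bucket step equals B's
-- conditional-add scan over tags, for any accumulated result set.
theorem pv_main (tags : List String) (nss : List (Option String)) (r : PySem.Set String) :
    nss.foldl (fun result ns_ =>
      match ns_ with
      | none => PySem.Set.update result ((tags.foldl (fun d tag =>
          d.modify (SplitTag tag).1 PySem.Set.empty (fun s => PySem.Set.add s tag)) PySem.Dict.empty).getD "" PySem.Set.empty)
      | some ns => PySem.Set.update result ((tags.foldl (fun d tag =>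
          d.modify (SplitTag tag).1 PySem.Set.empty (fun s => PySem.Set.add s tag)) PySem.Dict.empty).getD ns PySem.Set.empty)) r
    = nss.foldl (fun result ns_ =>
        tags.foldl (fun s tag => if pvNsOf tag == ns_.getD "" then PySem.Set.add s tag else s) result) r := by
  induction nss generalizing r with
  | nil => rfl
  | cons n ns ih =>
    simp only [List.foldl_cons]
    rw [← ih]
    congr 1
    cases n with
    | none =>
      show PySem.Set.update r _ = _
      rw [pv_bucket, pv_update_bucket]
      rfl
    | some v =>
      show PySem.Set.update r _ = _
      rw [pv_bucket, pv_update_bucket]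
      rfl

-- ===== VERDICT (by name: the statement is the Claim_ definition above) =====
theorem FilterNamespaces_spec : Claim_equal_FilterNamespaces := by
  intro tags namespaces _
  exact pv_main tags namespaces PySem.Set.empty
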